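-- pv_equiv track=rewrite | github.com/Scalas/PS_LeetCode | solutions/sol_2348.py | zero_filled_sub_array
-- ===== SOURCE A (Python) =====
-- from typing import List
--
-- def zero_filled_sub_array(nums: List[int]) -> int:
--     answer = 0
--     count = 0
--     for num in nums:
--         if num:
--             answer += (count * (count + 1) // 2)
--             count = 0
--         else:
--             count += 1
--     answer += (count * (count + 1) // 2)
--     return answer
-- ===== SOURCE B (Python) =====
-- from typing import List
--
-- def zero_filled_sub_array(nums: List[int]) -> int:
--     boundaries = [i for i, x in enumerate(nums) if x != 0]
--     boundaries.append(len(nums))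
--     answer = 0
--     prev = -1
--     for b in boundaries:
--         gap = b - prev - 1
--         answer += gap * (gap + 1) // 2
--         prev = b
--     return answer
-- ===== Notes on version B (the rewrite author's own statement) =====
-- stated objective: alternative
-- what changed: Instead of a single running-count pass, B first builds the list of nonzero-element indices (boundaries) plus len(nums), then sums a triangular number for each gap between consecutive boundaries.
import Mathlib
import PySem

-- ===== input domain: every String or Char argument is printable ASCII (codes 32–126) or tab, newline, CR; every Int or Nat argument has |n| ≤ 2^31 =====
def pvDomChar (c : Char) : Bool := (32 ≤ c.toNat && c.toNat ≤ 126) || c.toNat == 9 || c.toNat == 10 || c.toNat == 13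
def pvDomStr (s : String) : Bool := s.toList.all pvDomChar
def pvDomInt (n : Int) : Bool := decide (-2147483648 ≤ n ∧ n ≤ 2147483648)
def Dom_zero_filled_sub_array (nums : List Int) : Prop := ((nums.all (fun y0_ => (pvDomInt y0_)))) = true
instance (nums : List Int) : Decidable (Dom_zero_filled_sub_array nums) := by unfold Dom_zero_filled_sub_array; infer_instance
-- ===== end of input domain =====

-- B replaces A's running-count pass by a staged boundary-index computation: it collects
-- the indices of the nonzero elements, appends len(nums), and sums a triangular number
-- per gap between consecutive boundaries (objective: alternative decomposition).

-- ===== PORT A =====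
-- loop state (answer, count); a nonzero element flushes count*(count+1)//2 into answer
def zfsaStepA (p : Int × Int) (num : Int) : Int × Int :=
  if num ≠ 0 then (p.1 + PySem.Int.floordiv (p.2 * (p.2 + 1)) 2, 0)
  else (p.1, p.2 + 1)

def zero_filled_sub_array (nums : List Int) : Int :=
  let s := nums.foldl zfsaStepA (0, 0)
  s.1 + PySem.Int.floordiv (s.2 * (s.2 + 1)) 2

-- ===== PORT B =====
-- loop state (answer, prev); each boundary b contributes tri(b - prev - 1)
def zfsaGapStep (p : Int × Int) (b : Int) : Int × Int :=
  let gap := b - p.2 - 1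
  (p.1 + PySem.Int.floordiv (gap * (gap + 1)) 2, b)

def zero_filled_sub_array_alt (nums : List Int) : Int :=
  let boundaries :=
    ((PySem.List.enumerate nums).filter (fun p => p.2 ≠ 0)).map (fun p => p.1)
      ++ [(nums.length : Int)]
  (boundaries.foldl zfsaGapStep (0, -1)).1

-- ===== PRECONDITION & SPEC =====
def Spec_zero_filled_sub_array (nums : List Int) (out : Int) : Prop := out = zero_filled_sub_array_alt nums
instance (nums : List Int) (out : Int) : Decidable (Spec_zero_filled_sub_array nums out) := by unfold Spec_zero_filled_sub_array; infer_instance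

-- ===== CLAIM (what is proved, stated in full; the proofs are below) =====
def Claim_equal_zero_filled_sub_array : Prop := ∀ (nums : List Int), Dom_zero_filled_sub_array nums → Spec_zero_filled_sub_array nums (zero_filled_sub_array nums)

-- ===== LEMMAS AND PROOFS =====

-- Invariant tying A's state (ans, cnt) to B's state (ans, prev) with prev = s - cnt - 1,
-- where s is the enumeration index of the next element.
theorem zfsaLoop (xs : List Int) : ∀ (s : Int) (ans cnt : Int),
    ((((PySem.List.enumerate xs s).filter (fun p => p.2 ≠ 0)).map (fun p => p.1)
        ++ [s + xs.length]).foldl zfsaGapStep (ans, s - cnt - 1)).1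
      = (xs.foldl zfsaStepA (ans, cnt)).1
        + PySem.Int.floordiv ((xs.foldl zfsaStepA (ans, cnt)).2
            * ((xs.foldl zfsaStepA (ans, cnt)).2 + 1)) 2 := by
  induction xs with
  | nil =>
    intro s ans cnt
    have e1 : s - (s - cnt - 1) - 1 = cnt := by ring
    simp [PySem.List.enumerate_nil, List.foldl, zfsaGapStep, e1]
  | cons x xs ih =>
    intro s ans cnt
    rw [PySem.List.enumerate_cons]
    by_cases hx : x = 0
    · have h1 : List.foldl zfsaStepA (ans, cnt) (x :: xs)
          = List.foldl zfsaStepA (ans, cnt + 1) xs := by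
        simp [List.foldl, zfsaStepA, hx]
      have h2 : ((s, x) :: PySem.List.enumerate xs (s + 1)).filter (fun p => p.2 ≠ 0)
          = (PySem.List.enumerate xs (s + 1)).filter (fun p => p.2 ≠ 0) := by
        simp [hx]
      rw [h1, h2]
      have hgoal := ih (s + 1) ans (cnt + 1)
      have hprev : s + 1 - (cnt + 1) - 1 = s - cnt - 1 := by ring
      have hlen : s + 1 + (xs.length : Int) = s + ((x :: xs).length : Int) := by
        simp only [List.length_cons]; push_cast; ring
      rw [hprev, hlen] at hgoal
      exact hgoal
    · have h1 : List.foldl zfsaStepA (ans, cnt) (x :: xs)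
          = List.foldl zfsaStepA (ans + PySem.Int.floordiv (cnt * (cnt + 1)) 2, 0) xs := by
        simp [List.foldl, zfsaStepA, hx]
      have h2 : ((s, x) :: PySem.List.enumerate xs (s + 1)).filter (fun p => p.2 ≠ 0)
          = (s, x) :: (PySem.List.enumerate xs (s + 1)).filter (fun p => p.2 ≠ 0) := by
        simp [hx]
      have h3 : zfsaGapStep (ans, s - cnt - 1) s
          = (ans + PySem.Int.floordiv (cnt * (cnt + 1)) 2, s) := by
        have e1 : s - (s - cnt - 1) - 1 = cnt := by ring
        simp only [zfsaGapStep, e1]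
      rw [h1, h2]
      simp only [List.map_cons, List.cons_append, List.foldl, h3]
      have hgoal := ih (s + 1) (ans + PySem.Int.floordiv (cnt * (cnt + 1)) 2) 0
      have hprev : s + 1 - 0 - 1 = s := by ring
      have hlen : s + 1 + (xs.length : Int) = s + ((x :: xs).length : Int) := by
        simp only [List.length_cons]; push_cast; ring
      rw [hprev, hlen] at hgoal
      exact hgoal

-- ===== VERDICT (by name: the statement is the Claim_ definition above) =====
theorem zero_filled_sub_array_spec : Claim_equal_zero_filled_sub_array := by
  intro nums _
  unfold Spec_zero_filled_sub_array zero_filled_sub_array zero_filled_sub_array_alt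
  have h := zfsaLoop nums 0 0 0
  have e : (0:Int) - 0 - 1 = -1 := by ring
  rw [e, zero_add] at h
  exact h.symm
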